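-- pv_equiv track=rewrite | github.com/algo-idle/algo-study | sungwoo/challenge/programmers/ROR game/ror_game.py | solution
-- ===== SOURCE A (Python) =====
-- from collections import deque
--
-- dx = [0, 0, -1, 1]
--
-- dy = [-1, 1, 0, 0]
--
-- def solution(maps):
--     height = len(maps)
--     width = len(maps[0])
--     memo = [[999 for _ in range(width)] for _ in range(height)]
--     memo[0][0] = 1
--     queue = deque()
--     queue.append((0, 0))
--     while queue:
--         x, y = queue.popleft()
--         val = memo[y][x]
--         for i in range(4):
--             nx, ny = x + dx[i], y + dy[i]
--             if 0 <= nx < width and 0 <= ny < height: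
--                 if maps[ny][nx] == 1 and val + 1 < memo[ny][nx]:
--                     memo[ny][nx] = val + 1
--                     queue.append((nx, ny))
--     answer = memo[height - 1][width - 1] if memo[height - 1][width - 1] != 999 else -1
--     return answer
-- ===== SOURCE B (Python) =====
-- def solution(maps):
--     # Bellman-Ford-style relaxation: sweep the whole grid repeatedly, pulling each
--     # passable cell's distance from its neighbours, until a full sweep changes nothing.
--     height = len(maps)
--     width = len(maps[0])
--     UNREACHED = 999
--     dist = [[UNREACHED] * width for _ in range(height)]
--     dist[0][0] = 1
--     changed = True
--     while changed:
--         changed = False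
--         for y in range(height):
--             for x in range(width):
--                 if maps[y][x] != 1:
--                     continue
--                 for nx, ny in ((x - 1, y), (x + 1, y), (x, y - 1), (x, y + 1)):
--                     if 0 <= nx < width and 0 <= ny < height and dist[ny][nx] + 1 < dist[y][x]:
--                         dist[y][x] = dist[ny][nx] + 1
--                         changed = True
--     d = dist[height - 1][width - 1]
--     return d if d != UNREACHED else -1
-- ===== Notes on version B (the rewrite author's own statement) =====
-- stated objective: alternative
-- what changed: Replaced the BFS worklist (deque of cells, each pop relaxing its four neighbours outward) by queueless Bellman-Ford-style relaxation: repeated raster sweeps over the whole grid in which every passable cell pulls its distance from its neighbours, iterated to a fixpoint; Pre_ excludes the empty grid / empty first row (A raises IndexError) and grids with a row shorter than row 0, where A raises IndexError whenever its search reads such a row (and B's full sweep always does).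
-- outside the precondition, e.g. on solution([[1, 0], [0]]): A returns -1, B raises IndexError
import Mathlib
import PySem

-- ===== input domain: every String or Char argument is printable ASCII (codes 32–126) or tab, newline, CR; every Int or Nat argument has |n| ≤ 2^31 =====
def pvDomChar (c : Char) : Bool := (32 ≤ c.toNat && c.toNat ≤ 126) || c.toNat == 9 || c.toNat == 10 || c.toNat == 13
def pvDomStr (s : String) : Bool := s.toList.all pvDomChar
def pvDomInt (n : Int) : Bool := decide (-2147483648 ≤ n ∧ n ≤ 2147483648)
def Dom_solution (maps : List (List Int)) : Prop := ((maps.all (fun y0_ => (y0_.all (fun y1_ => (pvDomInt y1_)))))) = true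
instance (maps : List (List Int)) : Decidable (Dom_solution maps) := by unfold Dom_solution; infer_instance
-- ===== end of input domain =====

-- B replaces A's BFS worklist (a deque of cells, each pop pushing relaxations to its
-- neighbours) by queueless Bellman-Ford-style relaxation: repeated whole-grid sweeps in
-- which every passable cell pulls its distance from its neighbours, iterated to a fixpoint.

-- ===== PORT A =====
def pvDx : List Int := [0, 0, -1, 1]
def pvDy : List Int := [-1, 1, 0, 0]

-- grid[y][x] reads (in range wherever the ports evaluate them under Pre_)
def pvMapAt (g : List (List Int)) (x y : Int) : Int :=
  PySem.List.pyGetD (PySem.List.pyGetD g y []) x 0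
def pvMemoAt (m : List (List Int)) (x y : Int) : Int :=
  PySem.List.pyGetD (PySem.List.pyGetD m y []) x 999
-- memo[y][x] = v
def pvMemoSet (m : List (List Int)) (x y v : Int) : List (List Int) :=
  PySem.List.pySetD m y (PySem.List.pySetD (PySem.List.pyGetD m y []) x v)

-- one iteration of A's 'for i in range(4)' body
def pvRelax (maps : List (List Int)) (width height x y val : Int)
    (st : List (List Int) × List (Int × Int)) (i : Int) :
    List (List Int) × List (Int × Int) :=
  let nx := x + PySem.List.pyGetD pvDx i 0
  let ny := y + PySem.List.pyGetD pvDy i 0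
  if 0 ≤ nx ∧ nx < width ∧ 0 ≤ ny ∧ ny < height then
    if pvMapAt maps nx ny = 1 ∧ val + 1 < pvMemoAt st.1 nx ny then
      (pvMemoSet st.1 nx ny (val + 1), st.2 ++ [(nx, ny)])
    else st
  else st

-- A's 'while queue' loop (fuel only makes the recursion total; it is never exhausted under Pre_)
def pvRunA (maps : List (List Int)) (width height : Int) :
    Nat → List (List Int) → List (Int × Int) → List (List Int)
  | 0, memo, _ => memo
  | _ + 1, memo, [] => memo
  | fuel + 1, memo, (x, y) :: rest =>
      let val := pvMemoAt memo x y
      let st := (PySem.List.pyRange 0 4 1).foldl (pvRelax maps width height x y val) (memo, rest)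
      pvRunA maps width height fuel st.1 st.2

def solution (maps : List (List Int)) : Int :=
  let height : Int := maps.length
  let width : Int := (PySem.List.pyGetD maps 0 []).length
  let memo0 : List (List Int) :=
    (PySem.List.pyRange 0 height 1).map
      (fun _ => (PySem.List.pyRange 0 width 1).map (fun _ => (999 : Int)))
  let memo1 := pvMemoSet memo0 0 0 1
  let memo := pvRunA maps width height (999 * (height.toNat * width.toNat) + 2) memo1 [(0, 0)]
  if pvMemoAt memo (width - 1) (height - 1) ≠ 999 then
    pvMemoAt memo (width - 1) (height - 1)
  else -1

-- ===== PORT B =====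
-- B's neighbour tuple ((x-1,y),(x+1,y),(x,y-1),(x,y+1))
def pvNbrsB (x y : Int) : List (Int × Int) := [(x - 1, y), (x + 1, y), (x, y - 1), (x, y + 1)]

-- B's inner 'for nx, ny in …' loop body over one cell of the sweep
def pvPull (maps : List (List Int)) (W H : Int)
    (st : List (List Int) × Bool) (c : Int × Int) : List (List Int) × Bool :=
  if pvMapAt maps c.1 c.2 ≠ 1 then st
  else
    (pvNbrsB c.1 c.2).foldl (fun st n =>
      if 0 ≤ n.1 ∧ n.1 < W ∧ 0 ≤ n.2 ∧ n.2 < H ∧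
          pvMemoAt st.1 n.1 n.2 + 1 < pvMemoAt st.1 c.1 c.2
      then (pvMemoSet st.1 c.1 c.2 (pvMemoAt st.1 n.1 n.2 + 1), true) else st) st

-- one full raster sweep (the body of B's 'while changed' loop), returning (dist, changed)
def pvSweep (maps : List (List Int)) (W H : Int) (d : List (List Int)) :
    List (List Int) × Bool :=
  (PySem.List.pyRange 0 H 1).foldl (fun st y =>
    (PySem.List.pyRange 0 W 1).foldl (fun st x => pvPull maps W H st (x, y)) st) (d, false)

-- B's 'while changed' loop (fuel only makes the recursion total; never exhausted under Pre_)
def pvRunSweeps (maps : List (List Int)) (W H : Int) :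
    Nat → List (List Int) → List (List Int)
  | 0, d => d
  | fuel + 1, d =>
      if (pvSweep maps W H d).2 then pvRunSweeps maps W H fuel (pvSweep maps W H d).1
      else (pvSweep maps W H d).1

def solution_alt (maps : List (List Int)) : Int :=
  let height : Int := maps.length
  let width : Int := (PySem.List.pyGetD maps 0 []).length
  let dist0 : List (List Int) :=
    (PySem.List.pyRange 0 height 1).map (fun _ => List.replicate width.toNat (999 : Int))
  let dist := pvRunSweeps maps width height (999 * (height.toNat * width.toNat) + 1)
    (pvMemoSet dist0 0 0 1)
  let d := pvMemoAt dist (width - 1) (height - 1)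
  if d ≠ 999 then d else -1

-- ===== PRECONDITION & SPEC =====
-- Pre_ excludes the empty grid and an empty first row (A raises IndexError there), and grids
-- with a row shorter than row 0: on those A raises IndexError whenever its search reads such a
-- row, and returns only when the short rows happen to stay unread (B's full sweep always reads
-- them and raises) — see the cite for an excluded input on which A returns.
def Pre_solution (maps : List (List Int)) : Prop :=
  maps ≠ [] ∧ PySem.List.pyGetD maps 0 [] ≠ [] ∧
    ∀ row ∈ maps, (PySem.List.pyGetD maps 0 []).length ≤ row.length
instance (maps : List (List Int)) : Decidable (Pre_solution maps) := by
  unfold Pre_solution; infer_instance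

def pvWitness_solution : List (List Int) := [[1, 0], [1, 1]]

def Spec_solution (maps : List (List Int)) (out : Int) : Prop := out = solution_alt maps
instance (maps : List (List Int)) (out : Int) : Decidable (Spec_solution maps out) := by
  unfold Spec_solution; infer_instance

-- ===== CLAIM (what is proved, stated in full; the proofs are below) =====
def Claim_equal_solution : Prop :=
  ∀ (maps : List (List Int)), Dom_solution maps → Pre_solution maps →
    Spec_solution maps (solution maps)

-- ===== LEMMAS AND PROOFS =====

-- in-bounds cells, the rectangular-shape predicate, adjacency, grid sum
def pvInb (W H : Int) (c : Int × Int) : Prop := 0 ≤ c.1 ∧ c.1 < W ∧ 0 ≤ c.2 ∧ c.2 < H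
def pvDims (H W : Nat) (m : List (List Int)) : Prop :=
  m.length = H ∧ ∀ row ∈ m, row.length = W
def pvAdj (c n : Int × Int) : Prop :=
  (c.1 = n.1 ∧ (n.2 = c.2 - 1 ∨ n.2 = c.2 + 1)) ∨ (c.2 = n.2 ∧ (n.1 = c.1 - 1 ∨ n.1 = c.1 + 1))
def pvSum (m : List (List Int)) : Int := (m.map (fun r => r.sum)).sum

-- paths of adjacent passable cells from (0,0); the Int is the cell count (start counts as 1)
inductive PvPath (maps : List (List Int)) (W H : Int) : Int × Int → Int → Prop
  | start : PvPath maps W H (0, 0) 1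
  | step (c n : Int × Int) (k : Int) : PvPath maps W H c k → pvAdj c n → pvInb W H n →
      pvMapAt maps n.1 n.2 = 1 → PvPath maps W H n (k + 1)

-- no relaxation applies anywhere: the common terminal condition of both programs
def pvStable (maps : List (List Int)) (W H : Int) (m : List (List Int)) : Prop :=
  ∀ x n : Int × Int, pvInb W H x → pvInb W H n → pvAdj x n → pvMapAt maps n.1 n.2 = 1 →
    pvMemoAt m n.1 n.2 ≤ pvMemoAt m x.1 x.2 + 1

-- soundness invariant both programs maintain on their distance grid
def pvInv (maps : List (List Int)) (W H : Int) (m : List (List Int)) : Prop :=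
  pvDims H.toNat W.toNat m ∧ pvMemoAt m 0 0 = 1 ∧
  ∀ c : Int × Int, pvInb W H c → 1 ≤ pvMemoAt m c.1 c.2 ∧ pvMemoAt m c.1 c.2 ≤ 999 ∧
    (pvMemoAt m c.1 c.2 ≠ 999 → PvPath maps W H c (pvMemoAt m c.1 c.2))

-- A's queue invariant: any cell from which a relaxation is possible is on the queue
def pvQInv (maps : List (List Int)) (W H : Int) (m : List (List Int))
    (q : List (Int × Int)) : Prop :=
  (∀ c ∈ q, pvInb W H c) ∧
  ∀ x n : Int × Int, pvInb W H x → pvInb W H n → pvAdj x n → pvMapAt maps n.1 n.2 = 1 →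
    pvMemoAt m x.1 x.2 + 1 < pvMemoAt m n.1 n.2 → x ∈ q

-- A's neighbour list in dx/dy order, and A's relax step rewritten over the neighbour cell
def pvNbrs (x y : Int) : List (Int × Int) := [(x, y - 1), (x, y + 1), (x - 1, y), (x + 1, y)]
def pvRelaxC (maps : List (List Int)) (W H val : Int)
    (st : List (List Int) × List (Int × Int)) (n : Int × Int) :
    List (List Int) × List (Int × Int) :=
  if 0 ≤ n.1 ∧ n.1 < W ∧ 0 ≤ n.2 ∧ n.2 < H then
    if pvMapAt maps n.1 n.2 = 1 ∧ val + 1 < pvMemoAt st.1 n.1 n.2 then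
      (pvMemoSet st.1 n.1 n.2 (val + 1), st.2 ++ [n])
    else st
  else st

lemma mem_pvNbrs {x y : Int} {n : Int × Int} : n ∈ pvNbrs x y ↔ pvAdj (x, y) n := by
  simp only [pvNbrs, pvAdj, List.mem_cons, List.not_mem_nil, or_false, Prod.ext_iff]
  omega

lemma mem_pvNbrsB {x y : Int} {n : Int × Int} : n ∈ pvNbrsB x y ↔ pvAdj (x, y) n := by
  simp only [pvNbrsB, pvAdj, List.mem_cons, List.not_mem_nil, or_false, Prod.ext_iff]
  omega

lemma pvAdj_symm {c n : Int × Int} (h : pvAdj c n) : pvAdj n c := by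
  unfold pvAdj at h ⊢; omega

lemma pvRange4 : PySem.List.pyRange 0 4 1 = [0, 1, 2, 3] := by decide

lemma pvRelax_fold_eq (maps : List (List Int)) (W H x y val : Int)
    (st : List (List Int) × List (Int × Int)) :
    (PySem.List.pyRange 0 4 1).foldl (pvRelax maps W H x y val) st
      = (pvNbrs x y).foldl (pvRelaxC maps W H val) st := by
  have h0 : PySem.List.pyGetD pvDx (0 : Int) 0 = 0 := by decide
  have h1 : PySem.List.pyGetD pvDx (1 : Int) 0 = 0 := by decide
  have h2 : PySem.List.pyGetD pvDx (2 : Int) 0 = -1 := by decide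
  have h3 : PySem.List.pyGetD pvDx (3 : Int) 0 = 1 := by decide
  have g0 : PySem.List.pyGetD pvDy (0 : Int) 0 = -1 := by decide
  have g1 : PySem.List.pyGetD pvDy (1 : Int) 0 = 1 := by decide
  have g2 : PySem.List.pyGetD pvDy (2 : Int) 0 = 0 := by decide
  have g3 : PySem.List.pyGetD pvDy (3 : Int) 0 = 0 := by decide
  rw [pvRange4]
  simp only [pvNbrs, List.foldl, pvRelax, pvRelaxC, h0, h1, h2, h3, g0, g1, g2, g3]
  norm_num [sub_eq_add_neg]

lemma pvMemoSet_dims {H W : Nat} {m : List (List Int)} (hd : pvDims H W m)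
    {x y : Int} (hy : 0 ≤ y) (hyH : y < H) (v : Int) :
    pvDims H W (pvMemoSet m x y v) := by
  obtain ⟨hlen, hrow⟩ := hd
  have hyl : y < (m.length : Int) := by omega
  have hrl : y.toNat < m.length := by omega
  unfold pvMemoSet
  rw [PySem.List.pySetD_of_nonneg _ _ hy, PySem.List.pyGetD_eq_getElem _ _ hy hyl]
  refine ⟨by simpa using hlen, ?_⟩
  intro row hr
  rcases List.mem_or_eq_of_mem_set hr with h | h
  · exact hrow row h
  · subst h
    rw [PySem.List.length_pySetD]
    exact hrow _ (List.getElem_mem hrl)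

lemma pvMemoAt_set {H W : Nat} {m : List (List Int)} (hd : pvDims H W m)
    {x y a b : Int} (hx : 0 ≤ x) (hxW : x < W) (hy : 0 ≤ y) (hyH : y < H)
    (ha : 0 ≤ a) (haW : a < W) (hb : 0 ≤ b) (hbH : b < H) (v : Int) :
    pvMemoAt (pvMemoSet m x y v) a b = if a = x ∧ b = y then v else pvMemoAt m a b := by
  obtain ⟨hlen, hrow⟩ := hd
  have hyl : y < (m.length : Int) := by omega
  have hyn : y.toNat < m.length := by omega
  have hbn : b.toNat < m.length := by omega
  have hWrow : ∀ r ∈ m, r.length = W := hrow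
  have hxw : x.toNat < (m[y.toNat]).length := by
    rw [hWrow _ (List.getElem_mem hyn)]; omega
  have haw : ∀ r ∈ m, a.toNat < r.length := by
    intro r hr; rw [hWrow r hr]; omega
  unfold pvMemoSet pvMemoAt
  rw [PySem.List.pySetD_of_nonneg _ _ hy, PySem.List.pyGetD_eq_getElem _ _ hy hyl,
    PySem.List.pySetD_of_nonneg _ _ hx]
  by_cases hby : b = y
  · subst hby
    have : b.toNat < (m.set b.toNat ((m[b.toNat]).set x.toNat v)).length := by
      simpa using hbn
    rw [PySem.List.pyGetD_eq_getElem _ _ hb (by simpa using hyl),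
      PySem.List.pyGetD_eq_getElem _ _ hb hyl]
    rw [List.getElem_set_self (by simpa using hbn)]
    by_cases hax : a = x
    · subst hax
      rw [PySem.List.pyGetD_eq_getElem _ _ ha (by rw [List.length_set]; omega)]
      rw [List.getElem_set_self (by simpa using hxw)]
      simp
    · have hne : a.toNat ≠ x.toNat := by omega
      rw [if_neg (by tauto)]
      have hA := haw _ (List.getElem_mem hbn)
      rw [PySem.List.pyGetD_eq_getElem _ _ ha (by rw [List.length_set]; omega),
        PySem.List.pyGetD_eq_getElem _ _ ha (by omega)]
      rw [List.getElem_set_ne (by omega)]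
  · rw [if_neg (by tauto)]
    rw [PySem.List.pyGetD_eq_getElem _ _ hb (by simpa using (show b < (m.length : Int) by omega)),
      PySem.List.pyGetD_eq_getElem _ _ hb (by omega)]
    rw [List.getElem_set_ne (by omega)]

-- pair form of pvMemoAt_set
lemma pvMemoAt_set' (W H : Int) {m : List (List Int)} (hd : pvDims H.toNat W.toNat m)
    {c a : Int × Int} (hc : pvInb W H c) (ha : pvInb W H a) (v : Int) :
    pvMemoAt (pvMemoSet m c.1 c.2 v) a.1 a.2 = if a = c then v else pvMemoAt m a.1 a.2 := by
  obtain ⟨hc1, hc2, hc3, hc4⟩ := hc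
  obtain ⟨ha1, ha2, ha3, ha4⟩ := ha
  rw [pvMemoAt_set hd hc1 (by omega) hc3 (by omega) ha1 (by omega) ha3 (by omega) v]
  by_cases h : a = c
  · rw [if_pos h, if_pos ⟨by rw [h], by rw [h]⟩]
  · rw [if_neg h, if_neg (fun hc' => h (Prod.ext hc'.1 hc'.2))]

lemma pvMemoAt_idx {m : List (List Int)} (i j : Nat) (hj : j < m.length)
    (hi : i < (m[j]'hj).length) : pvMemoAt m (i : Int) (j : Int) = (m[j]'hj)[i]'hi := by
  unfold pvMemoAt
  have h1 : PySem.List.pyGetD m ((j : Nat) : Int) ([] : List Int) = m[j]'hj := by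
    rw [PySem.List.pyGetD_eq_getElem _ _ (by omega) (by exact_mod_cast hj)]
    simp
  rw [h1]
  rw [PySem.List.pyGetD_eq_getElem _ _ (by omega) (by exact_mod_cast hi)]
  simp

lemma pvSumSet0 (l : List Int) (i : Nat) (a : Int) (h : i < l.length) :
    (l.set i a).sum = l.sum - l[i] + a := by
  rw [List.sum_set]
  push_cast [h]
  have h1 := List.sum_take_add_sum_drop l i
  rw [List.drop_eq_getElem_cons h, List.sum_cons] at h1
  omega

lemma pvSum_set (W H : Int) {m : List (List Int)} (hd : pvDims H.toNat W.toNat m)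
    {c : Int × Int} (hc : pvInb W H c) (v : Int) :
    pvSum (pvMemoSet m c.1 c.2 v) = pvSum m - pvMemoAt m c.1 c.2 + v := by
  obtain ⟨hc1, hc2, hc3, hc4⟩ := hc
  obtain ⟨hlen, hrow⟩ := hd
  have hj : c.2.toNat < m.length := by omega
  have hi : c.1.toNat < (m[c.2.toNat]'hj).length := by
    rw [hrow _ (List.getElem_mem hj)]; omega
  have hset : pvMemoSet m c.1 c.2 v = m.set c.2.toNat ((m[c.2.toNat]'hj).set c.1.toNat v) := by
    unfold pvMemoSet
    rw [PySem.List.pySetD_of_nonneg _ _ hc3,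
      PySem.List.pyGetD_eq_getElem _ _ hc3 (by omega),
      PySem.List.pySetD_of_nonneg _ _ hc1]
  have hat : pvMemoAt m c.1 c.2 = (m[c.2.toNat]'hj)[c.1.toNat]'hi := by
    have := pvMemoAt_idx c.1.toNat c.2.toNat hj hi
    rwa [Int.toNat_of_nonneg hc1, Int.toNat_of_nonneg hc3] at this
  rw [hset, hat]
  unfold pvSum
  rw [List.map_set]
  rw [pvSumSet0 _ _ _ (by simpa using hj)]
  rw [pvSumSet0 _ _ _ hi]
  simp only [List.getElem_map]
  ring

lemma pvSum_bounds (W H : Int) {m : List (List Int)} (hd : pvDims H.toNat W.toNat m)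
    (h : ∀ c : Int × Int, pvInb W H c →
      1 ≤ pvMemoAt m c.1 c.2 ∧ pvMemoAt m c.1 c.2 ≤ 999) :
    0 ≤ pvSum m ∧ pvSum m ≤ ((999 * (H.toNat * W.toNat) : Nat) : Int) := by
  obtain ⟨hlen, hrow⟩ := hd
  have hent : ∀ row ∈ m, ∀ v ∈ row, 1 ≤ v ∧ v ≤ 999 := by
    intro row hr v hv
    obtain ⟨j, hj, hje⟩ := List.getElem_of_mem hr
    have hv' : v ∈ m[j]'hj := by rw [hje]; exact hv
    obtain ⟨i, hi, hie⟩ := List.getElem_of_mem hv'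
    have hiW : i < W.toNat := by
      have := hrow _ (List.getElem_mem hj)
      omega
    have hjH : j < H.toNat := by rw [← hlen]; exact hj
    have hval : pvMemoAt m (i : Int) (j : Int) = v := by
      rw [pvMemoAt_idx i j hj hi]
      exact hie
    rw [← hval]
    exact h (⟨(i : Int), (j : Int)⟩) ⟨by omega, by omega, by omega, by omega⟩
  have hrowb : ∀ s ∈ m.map (fun r => r.sum), 0 ≤ s ∧ s ≤ 999 * (W.toNat : Int) := by
    intro s hs
    obtain ⟨row, hrm, hre⟩ := List.mem_map.mp hs
    constructor
    · rw [← hre]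
      exact List.sum_nonneg (fun v hv => by have := (hent row hrm v hv).1; omega)
    · rw [← hre]
      have := List.sum_le_card_nsmul row 999 (fun v hv => (hent row hrm v hv).2)
      rw [hrow row hrm] at this
      simpa [nsmul_eq_mul, mul_comm] using this
  constructor
  · exact List.sum_nonneg (fun s hs => (hrowb s hs).1)
  · have := List.sum_le_card_nsmul (m.map (fun r => r.sum)) (999 * (W.toNat : Int))
      (fun s hs => (hrowb s hs).2)
    rw [List.length_map, hlen] at this
    calc pvSum m ≤ (H.toNat : Int) • (999 * (W.toNat : Int)) := this
      _ = ((999 * (H.toNat * W.toNat) : Nat) : Int) := by push_cast; ring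

-- the freshly built 999-grid reads 999 everywhere; its dimensions
lemma pvMemo0_at (W H : Int) (a b : Int) :
    pvMemoAt ((PySem.List.pyRange 0 H 1).map
      (fun _ => (PySem.List.pyRange 0 W 1).map (fun _ => (999 : Int)))) a b = 999 := by
  unfold pvMemoAt
  have hrow : ∀ (row : List Int), (∀ v ∈ row, v = 999) → PySem.List.pyGetD row a 999 = 999 := by
    intro row hr
    by_cases h : PySem.Raise.InRange row.length a
    · exact hr _ (PySem.List.pyGetD_mem row 999 h)
    · exact PySem.List.pyGetD_of_none row a 999 ((PySem.List.pyGet?_eq_none_iff _ _).mpr h)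
  by_cases h : PySem.Raise.InRange ((PySem.List.pyRange 0 H 1).map
      (fun _ => (PySem.List.pyRange 0 W 1).map (fun _ => (999 : Int)))).length b
  · have hmem := PySem.List.pyGetD_mem ((PySem.List.pyRange 0 H 1).map
      (fun _ => (PySem.List.pyRange 0 W 1).map (fun _ => (999 : Int)))) ([] : List Int) h
    obtain ⟨_, _, heq⟩ := List.mem_map.mp hmem
    rw [← heq]
    apply hrow
    intro v hv
    obtain ⟨_, _, hveq⟩ := List.mem_map.mp hv
    exact hveq.symm
  · rw [PySem.List.pyGetD_of_none _ b [] ((PySem.List.pyGet?_eq_none_iff _ _).mpr h)]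
    exact hrow [] (by simp)

lemma pvMemo0_dims (W H : Int) :
    pvDims H.toNat W.toNat ((PySem.List.pyRange 0 H 1).map
      (fun _ => (PySem.List.pyRange 0 W 1).map (fun _ => (999 : Int)))) := by
  constructor
  · rw [List.length_map, PySem.List.length_pyRange_one]
    omega
  · intro row hr
    obtain ⟨_, _, heq⟩ := List.mem_map.mp hr
    rw [← heq, List.length_map, PySem.List.length_pyRange_one]
    omega

-- B's freshly built grid (rows by list repetition) is the same list as A's
lemma pvGrid_eq (W H : Int) :
    (PySem.List.pyRange 0 H 1).map (fun _ => List.replicate W.toNat (999 : Int))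
      = (PySem.List.pyRange 0 H 1).map
          (fun _ => (PySem.List.pyRange 0 W 1).map (fun _ => (999 : Int))) := by
  have hinner : (PySem.List.pyRange 0 W 1).map (fun _ => (999 : Int))
      = List.replicate W.toNat (999 : Int) := by
    rw [List.map_const']
    rw [PySem.List.length_pyRange_one]
    norm_num
  rw [hinner]

-- the initial grid (999 everywhere, start set to 1), pointwise
lemma pvInit_at (W H : Int) (c : Int × Int) (hc : pvInb W H c) :
    pvMemoAt (pvMemoSet ((PySem.List.pyRange 0 H 1).map
        (fun _ => (PySem.List.pyRange 0 W 1).map (fun _ => (999 : Int)))) 0 0 1) c.1 c.2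
      = if c = (0, 0) then 1 else 999 := by
  have hW : 0 < W := by obtain ⟨h1, h2, _, _⟩ := hc; omega
  have hH : 0 < H := by obtain ⟨_, _, h3, h4⟩ := hc; omega
  have h00 : pvInb W H ((0 : Int), (0 : Int)) := ⟨le_rfl, hW, le_rfl, hH⟩
  have := pvMemoAt_set' W H (pvMemo0_dims W H) (c := ((0 : Int), (0 : Int))) h00 hc 1
  simp only at this
  rw [this]
  rw [pvMemo0_at]

lemma pvInit_inv (maps : List (List Int)) (W H : Int) (hW : 0 < W) (hH : 0 < H) :
    pvInv maps W H (pvMemoSet ((PySem.List.pyRange 0 H 1).map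
      (fun _ => (PySem.List.pyRange 0 W 1).map (fun _ => (999 : Int)))) 0 0 1) := by
  have h00 : pvInb W H ((0 : Int), (0 : Int)) := ⟨le_rfl, hW, le_rfl, hH⟩
  refine ⟨pvMemoSet_dims (pvMemo0_dims W H) le_rfl (by omega) 1, ?_, ?_⟩
  · have := pvInit_at W H ((0 : Int), (0 : Int)) h00
    simpa using this
  · intro c hc
    rw [pvInit_at W H c hc]
    by_cases h : c = (0, 0)
    · rw [if_pos h]
      refine ⟨le_rfl, by omega, fun _ => ?_⟩
      rw [h]
      exact PvPath.start
    · rw [if_neg h]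
      exact ⟨by omega, le_rfl, fun h' => absurd rfl h'⟩

-- ===== A side: the relax pass and the queue loop reach a stable grid =====

lemma pvRelaxC_run (maps : List (List Int)) (W H val : Int) :
    ∀ (ns : List (Int × Int)) (memo : List (List Int)) (q : List (Int × Int)),
    pvDims H.toNat W.toNat memo →
    ∃ M d, List.foldl (pvRelaxC maps W H val) (memo, q) ns = (M, q ++ d) ∧
      pvDims H.toNat W.toNat M ∧
      pvSum M + (d.length : Int) ≤ pvSum memo ∧
      (∀ a : Int × Int, pvInb W H a → a ∉ d → pvMemoAt M a.1 a.2 = pvMemoAt memo a.1 a.2) ∧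
      (∀ n ∈ d, n ∈ ns ∧ pvInb W H n ∧ pvMapAt maps n.1 n.2 = 1 ∧
        pvMemoAt M n.1 n.2 = val + 1 ∧ val + 1 < pvMemoAt memo n.1 n.2) ∧
      (∀ n ∈ ns, pvInb W H n → pvMapAt maps n.1 n.2 = 1 → pvMemoAt M n.1 n.2 ≤ val + 1) := by
  intro ns
  induction ns with
  | nil =>
    intro memo q hd
    exact ⟨memo, [], by simp, hd, by simp, fun a _ _ => rfl, by simp, by simp⟩
  | cons n ns ih =>
    intro memo q hd
    by_cases hb : 0 ≤ n.1 ∧ n.1 < W ∧ 0 ≤ n.2 ∧ n.2 < H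
    · have hbin : pvInb W H n := hb
      by_cases hcnd : pvMapAt maps n.1 n.2 = 1 ∧ val + 1 < pvMemoAt memo n.1 n.2
      · have hstep : pvRelaxC maps W H val (memo, q) n
            = (pvMemoSet memo n.1 n.2 (val + 1), q ++ [n]) := by
          simp only [pvRelaxC, if_pos hb, if_pos hcnd]
        have hd' : pvDims H.toNat W.toNat (pvMemoSet memo n.1 n.2 (val + 1)) :=
          pvMemoSet_dims hd hb.2.2.1 (by omega) (val + 1)
        have hat : ∀ a : Int × Int, pvInb W H a →
            pvMemoAt (pvMemoSet memo n.1 n.2 (val + 1)) a.1 a.2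
              = if a = n then val + 1 else pvMemoAt memo a.1 a.2 :=
          fun a ha => pvMemoAt_set' W H hd hbin ha (val + 1)
        obtain ⟨M, d', hfold, hdM, hsum, hunch, hupd, hpost⟩ :=
          ih (pvMemoSet memo n.1 n.2 (val + 1)) (q ++ [n]) hd'
        have hnd' : n ∉ d' := by
          intro hmem
          have := (hupd n hmem).2.2.2.2
          rw [hat n hbin, if_pos rfl] at this
          omega
        have hMn : pvMemoAt M n.1 n.2 = val + 1 := by
          rw [hunch n hbin hnd', hat n hbin, if_pos rfl]
        have hsum' : pvSum (pvMemoSet memo n.1 n.2 (val + 1)) + 1 ≤ pvSum memo := by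
          rw [show pvMemoSet memo n.1 n.2 (val + 1) = pvMemoSet memo n.1 n.2 (val + 1) from rfl,
            pvSum_set W H hd hbin (val + 1)]
          omega
        refine ⟨M, n :: d', ?_, hdM, ?_, ?_, ?_, ?_⟩
        · rw [List.foldl_cons, hstep, hfold]
          simp
        · simp only [List.length_cons]
          push_cast
          omega
        · intro a ha hna
          rw [hunch a ha (fun h => hna (List.mem_cons_of_mem _ h)),
            hat a ha, if_neg (fun h => hna (by rw [h]; exact List.mem_cons_self))]
        · intro n' hn'
          rcases List.mem_cons.mp hn' with h | h
          · subst h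
            exact ⟨List.mem_cons_self, hbin, hcnd.1, hMn, hcnd.2⟩
          · obtain ⟨hmem, hinb, hmap, hM, hlt⟩ := hupd n' h
            have hne : n' ≠ n := by
              intro he
              rw [he] at hlt
              rw [hat n hbin, if_pos rfl] at hlt
              omega
            refine ⟨List.mem_cons_of_mem _ hmem, hinb, hmap, hM, ?_⟩
            rwa [hat n' hinb, if_neg hne] at hlt
        · intro n' hn' hinb' hmap'
          rcases List.mem_cons.mp hn' with h | h
          · subst h
            rw [hMn]
          · exact hpost n' h hinb' hmap'
      · have hstep : pvRelaxC maps W H val (memo, q) n = (memo, q) := by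
          simp only [pvRelaxC, if_pos hb, if_neg hcnd]
        obtain ⟨M, d', hfold, hdM, hsum, hunch, hupd, hpost⟩ := ih memo q hd
        refine ⟨M, d', by rw [List.foldl_cons, hstep, hfold], hdM, hsum, hunch, ?_, ?_⟩
        · intro n' hn'
          obtain ⟨hmem, rest⟩ := hupd n' hn'
          exact ⟨List.mem_cons_of_mem _ hmem, rest⟩
        · intro n' hn' hinb' hmap'
          rcases List.mem_cons.mp hn' with h | h
          · subst h
            have hle : pvMemoAt memo n'.1 n'.2 ≤ val + 1 := by
              by_contra hgt
              exact hcnd ⟨hmap', by omega⟩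
            by_cases hmem : n' ∈ d'
            · rw [(hupd n' hmem).2.2.2.1]
            · rw [hunch n' hinb' hmem]
              exact hle
          · exact hpost n' h hinb' hmap'
    · have hstep : pvRelaxC maps W H val (memo, q) n = (memo, q) := by
        simp only [pvRelaxC, if_neg hb]
      obtain ⟨M, d', hfold, hdM, hsum, hunch, hupd, hpost⟩ := ih memo q hd
      refine ⟨M, d', by rw [List.foldl_cons, hstep, hfold], hdM, hsum, hunch, ?_, ?_⟩
      · intro n' hn'
        obtain ⟨hmem, rest⟩ := hupd n' hn'
        exact ⟨List.mem_cons_of_mem _ hmem, rest⟩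
      · intro n' hn' hinb' hmap'
        rcases List.mem_cons.mp hn' with h | h
        · exact absurd (h ▸ hinb') hb
        · exact hpost n' h hinb' hmap'

lemma pvRunA_stable (maps : List (List Int)) (W H : Int) :
    ∀ (fuel : Nat) (m : List (List Int)) (q : List (Int × Int)),
    pvInv maps W H m → pvQInv maps W H m q →
    q.length + (pvSum m).toNat ≤ fuel →
    pvInv maps W H (pvRunA maps W H fuel m q) ∧
      pvStable maps W H (pvRunA maps W H fuel m q) := by
  intro fuel
  induction fuel with
  | zero =>
    intro m q hInv hQ hfuel
    have hq : q = [] := List.eq_nil_of_length_eq_zero (by omega)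
    subst hq
    rw [show pvRunA maps W H 0 m [] = m from rfl]
    refine ⟨hInv, ?_⟩
    intro x n hx hn hadj hmap
    by_contra hgt
    exact absurd (hQ.2 x n hx hn hadj hmap (by omega)) (List.not_mem_nil)
  | succ fuel ih =>
    intro m q hInv hQ hfuel
    match q with
    | [] =>
      rw [show pvRunA maps W H (fuel + 1) m [] = m from rfl]
      refine ⟨hInv, ?_⟩
      intro x n hx hn hadj hmap
      by_contra hgt
      exact absurd (hQ.2 x n hx hn hadj hmap (by omega)) (List.not_mem_nil)
    | ⟨x, y⟩ :: rest =>
      obtain ⟨hdm, hstart, hcells⟩ := hInv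
      have hxy : pvInb W H (x, y) := hQ.1 _ List.mem_cons_self
      set val := pvMemoAt m x y with hval
      obtain ⟨M, d, hfold, hdM, hsum, hunch, hupd, hpost⟩ :=
        pvRelaxC_run maps W H val (pvNbrs x y) m rest hdm
      have hval1 : 1 ≤ val := (hcells _ hxy).1
      have hInvM : pvInv maps W H M := by
        refine ⟨hdM, ?_, ?_⟩
        · have h00 : pvInb W H ((0 : Int), (0 : Int)) := by
            obtain ⟨h1, h2, h3, h4⟩ := hxy
            exact ⟨le_rfl, by omega, le_rfl, by omega⟩
          have hn0 : ((0 : Int), (0 : Int)) ∉ d := by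
            intro hmem
            have := (hupd _ hmem).2.2.2.2
            simp only at this
            rw [hstart] at this
            omega
          have := hunch ((0 : Int), (0 : Int)) h00 hn0
          simp only at this
          rw [this]
          exact hstart
        · intro c hc
          by_cases hmem : c ∈ d
          · obtain ⟨hmemns, hinb, hmap, hM, hlt⟩ := hupd c hmem
            have hub : pvMemoAt m c.1 c.2 ≤ 999 := (hcells c hinb).2.1
            refine ⟨by rw [hM]; omega, by rw [hM]; omega, fun _ => ?_⟩
            rw [hM]
            have hvne : val ≠ 999 := by omega
            have hpath : PvPath maps W H (x, y) val := (hcells _ hxy).2.2 hvne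
            exact PvPath.step _ _ _ hpath (mem_pvNbrs.mp hmemns) hinb hmap
          · rw [hunch c hc hmem]
            exact hcells c hc
      have hQM : pvQInv maps W H M (rest ++ d) := by
        refine ⟨?_, ?_⟩
        · intro c hc
          rcases List.mem_append.mp hc with h | h
          · exact hQ.1 c (List.mem_cons_of_mem _ h)
          · exact (hupd c h).2.1
        · intro x' n' hx' hn' hadj hmap hlt
          by_cases hxd : x' ∈ d
          · exact List.mem_append.mpr (Or.inr hxd)
          · have hx'eq : pvMemoAt M x'.1 x'.2 = pvMemoAt m x'.1 x'.2 := hunch x' hx' hxd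
            by_cases hnd : n' ∈ d
            · have hlt0 : pvMemoAt m x'.1 x'.2 + 1 < pvMemoAt m n'.1 n'.2 := by
                have h1 := (hupd n' hnd).2.2.2.1
                have h2 := (hupd n' hnd).2.2.2.2
                rw [hx'eq] at hlt
                rw [h1] at hlt
                omega
              have := hQ.2 x' n' hx' hn' hadj hmap hlt0
              rcases List.mem_cons.mp this with h | h
              · exfalso
                have : pvMemoAt m x'.1 x'.2 = val := by rw [h]
                rw [hx'eq, this, (hupd n' hnd).2.2.2.1] at hlt
                omega
              · exact List.mem_append.mpr (Or.inl h)
            · have hn'eq : pvMemoAt M n'.1 n'.2 = pvMemoAt m n'.1 n'.2 := hunch n' hn' hnd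
              have hlt0 : pvMemoAt m x'.1 x'.2 + 1 < pvMemoAt m n'.1 n'.2 := by
                rw [hx'eq, hn'eq] at hlt
                exact hlt
              have := hQ.2 x' n' hx' hn' hadj hmap hlt0
              rcases List.mem_cons.mp this with h | h
              · exfalso
                have hxv : pvMemoAt M x'.1 x'.2 = val := by rw [hx'eq, h]
                have hmemns : n' ∈ pvNbrs x y := by
                  apply mem_pvNbrs.mpr
                  have : pvAdj x' n' := hadj
                  rw [h] at this
                  exact this
                have := hpost n' hmemns hn' hmap
                rw [hxv, hn'eq] at hlt
                rw [hn'eq] at this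
                omega
              · exact List.mem_append.mpr (Or.inl h)
      have hrun : pvRunA maps W H (fuel + 1) m ((x, y) :: rest)
          = pvRunA maps W H fuel M (rest ++ d) := by
        rw [pvRunA]
        rw [pvRelax_fold_eq]
        rw [← hval, hfold]
      rw [hrun]
      apply ih M (rest ++ d) hInvM hQM
      have hS0 : 0 ≤ pvSum M := (pvSum_bounds W H hdM
        (fun c hc => ⟨(hInvM.2.2 c hc).1, (hInvM.2.2 c hc).2.1⟩)).1
      have hlq : ((x, y) :: rest).length + (pvSum m).toNat ≤ fuel + 1 := hfuel
      simp only [List.length_cons, List.length_append] at hlq ⊢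
      omega

-- ===== B side: the sweep loop reaches a stable grid =====

lemma pvPullFold (maps : List (List Int)) (W H : Int) (c : Int × Int)
    (hc : pvInb W H c) (hmapc : pvMapAt maps c.1 c.2 = 1) :
    ∀ (ns : List (Int × Int)), (∀ n ∈ ns, pvAdj c n) →
    ∀ (d : List (List Int)) (ch : Bool), pvInv maps W H d →
    ∃ d' ch', List.foldl (fun st n =>
        if 0 ≤ n.1 ∧ n.1 < W ∧ 0 ≤ n.2 ∧ n.2 < H ∧
            pvMemoAt st.1 n.1 n.2 + 1 < pvMemoAt st.1 c.1 c.2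
        then (pvMemoSet st.1 c.1 c.2 (pvMemoAt st.1 n.1 n.2 + 1), true) else st) (d, ch) ns
      = (d', ch') ∧ pvInv maps W H d' ∧
      ((d' = d ∧ ch' = ch) ∨ (ch' = true ∧ pvSum d' < pvSum d)) ∧
      (ch' = false → ch = false ∧ d' = d ∧ ∀ n ∈ ns,
        ¬(0 ≤ n.1 ∧ n.1 < W ∧ 0 ≤ n.2 ∧ n.2 < H ∧
          pvMemoAt d n.1 n.2 + 1 < pvMemoAt d c.1 c.2)) := by
  intro ns
  induction ns with
  | nil =>
    intro _ d ch hInv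
    exact ⟨d, ch, rfl, hInv, Or.inl ⟨rfl, rfl⟩, fun h => ⟨h ▸ rfl, rfl, by simp⟩⟩
  | cons n ns ih =>
    intro hadj d ch hInv
    obtain ⟨hdm, hstart, hcells⟩ := hInv
    by_cases hcond : 0 ≤ n.1 ∧ n.1 < W ∧ 0 ≤ n.2 ∧ n.2 < H ∧
        pvMemoAt d n.1 n.2 + 1 < pvMemoAt d c.1 c.2
    · have hninb : pvInb W H n := ⟨hcond.1, hcond.2.1, hcond.2.2.1, hcond.2.2.2.1⟩
      have hlt : pvMemoAt d n.1 n.2 + 1 < pvMemoAt d c.1 c.2 := hcond.2.2.2.2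
      have hn1 : 1 ≤ pvMemoAt d n.1 n.2 := (hcells n hninb).1
      have hcub : pvMemoAt d c.1 c.2 ≤ 999 := (hcells c hc).2.1
      have hcne0 : c ≠ (0, 0) := by
        intro he
        have : pvMemoAt d c.1 c.2 = 1 := by rw [he]; exact hstart
        omega
      set d1 := pvMemoSet d c.1 c.2 (pvMemoAt d n.1 n.2 + 1) with hd1
      have hdm1 : pvDims H.toNat W.toNat d1 :=
        pvMemoSet_dims hdm hc.2.2.1 (by obtain ⟨_, _, _, h4⟩ := hc; omega) _
      have hat : ∀ a : Int × Int, pvInb W H a →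
          pvMemoAt d1 a.1 a.2 = if a = c then pvMemoAt d n.1 n.2 + 1
            else pvMemoAt d a.1 a.2 :=
        fun a ha => pvMemoAt_set' W H hdm hc ha _
      have hInv1 : pvInv maps W H d1 := by
        refine ⟨hdm1, ?_, ?_⟩
        · have h00 : pvInb W H ((0 : Int), (0 : Int)) := by
            obtain ⟨h1, h2, h3, h4⟩ := hc
            exact ⟨le_rfl, by omega, le_rfl, by omega⟩
          have := hat ((0 : Int), (0 : Int)) h00
          simp only at this
          rw [this, if_neg (fun h => hcne0 (Eq.symm h))]
          exact hstart
        · intro a ha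
          rw [hat a ha]
          by_cases hac : a = c
          · rw [if_pos hac]
            have hnne : pvMemoAt d n.1 n.2 ≠ 999 := by omega
            have hpath : PvPath maps W H n (pvMemoAt d n.1 n.2) :=
              (hcells n hninb).2.2 hnne
            refine ⟨by omega, by omega, fun _ => ?_⟩
            rw [hac]
            exact PvPath.step _ _ _ hpath (pvAdj_symm (hadj n List.mem_cons_self)) hc hmapc
          · rw [if_neg hac]
            exact hcells a ha
      have hsum1 : pvSum d1 < pvSum d := by
        rw [hd1, pvSum_set W H hdm hc]
        omega
      obtain ⟨d', ch', hfold, hInv', hdisj, _⟩ :=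
        ih (fun n' hn' => hadj n' (List.mem_cons_of_mem _ hn')) d1 true hInv1
      refine ⟨d', ch', ?_, hInv', ?_, ?_⟩
      · rw [List.foldl_cons, if_pos hcond]
        exact hfold
      · rcases hdisj with ⟨he, hce⟩ | ⟨hce, hs⟩
        · exact Or.inr ⟨hce, he ▸ hsum1⟩
        · exact Or.inr ⟨hce, by omega⟩
      · intro hfalse
        exfalso
        rcases hdisj with ⟨_, hce⟩ | ⟨hce, _⟩ <;> rw [hfalse] at hce <;> exact Bool.noConfusion hce
    · obtain ⟨d', ch', hfold, hInv', hdisj, hstab⟩ :=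
        ih (fun n' hn' => hadj n' (List.mem_cons_of_mem _ hn')) d ch ⟨hdm, hstart, hcells⟩
      refine ⟨d', ch', ?_, hInv', hdisj, ?_⟩
      · rw [List.foldl_cons, if_neg hcond]
        exact hfold
      · intro hfalse
        obtain ⟨hch, hde, hall⟩ := hstab hfalse
        refine ⟨hch, hde, ?_⟩
        intro n' hn'
        rcases List.mem_cons.mp hn' with h | h
        · subst h
          exact hcond
        · exact hall n' h

lemma pvSweepFold (maps : List (List Int)) (W H : Int) :
    ∀ (cells : List (Int × Int)), (∀ cl ∈ cells, pvInb W H cl) →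
    ∀ (d : List (List Int)) (ch : Bool), pvInv maps W H d →
    ∃ d' ch', List.foldl (pvPull maps W H) (d, ch) cells = (d', ch') ∧
      pvInv maps W H d' ∧
      ((d' = d ∧ ch' = ch) ∨ (ch' = true ∧ pvSum d' < pvSum d)) ∧
      (ch' = false → ch = false ∧ d' = d ∧ ∀ cl ∈ cells, pvMapAt maps cl.1 cl.2 = 1 →
        ∀ n : Int × Int, pvAdj cl n → pvInb W H n →
          pvMemoAt d cl.1 cl.2 ≤ pvMemoAt d n.1 n.2 + 1) := by
  intro cells
  induction cells with
  | nil =>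
    intro _ d ch hInv
    exact ⟨d, ch, rfl, hInv, Or.inl ⟨rfl, rfl⟩, fun h => ⟨h ▸ rfl, rfl, by simp⟩⟩
  | cons cl cells ih =>
    intro hin d ch hInv
    have hclin : pvInb W H cl := hin cl List.mem_cons_self
    by_cases hm : pvMapAt maps cl.1 cl.2 = 1
    · have hpull : pvPull maps W H (d, ch) cl
          = List.foldl (fun st n =>
              if 0 ≤ n.1 ∧ n.1 < W ∧ 0 ≤ n.2 ∧ n.2 < H ∧
                  pvMemoAt st.1 n.1 n.2 + 1 < pvMemoAt st.1 cl.1 cl.2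
              then (pvMemoSet st.1 cl.1 cl.2 (pvMemoAt st.1 n.1 n.2 + 1), true) else st)
            (d, ch) (pvNbrsB cl.1 cl.2) := by
        simp only [pvPull, hm]
        simp
      have hadjall : ∀ n ∈ pvNbrsB cl.1 cl.2, pvAdj cl n := by
        intro n hn
        have := mem_pvNbrsB.mp hn
        simpa using this
      obtain ⟨d1, ch1, hfold1, hInv1, hdisj1, hstab1⟩ :=
        pvPullFold maps W H cl hclin hm (pvNbrsB cl.1 cl.2) hadjall d ch hInv
      obtain ⟨d', ch', hfold', hInv', hdisj', hstab'⟩ :=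
        ih (fun x hx => hin x (List.mem_cons_of_mem _ hx)) d1 ch1 hInv1
      refine ⟨d', ch', ?_, hInv', ?_, ?_⟩
      · rw [List.foldl_cons, hpull, hfold1]
        exact hfold'
      · rcases hdisj1 with ⟨he1, hc1⟩ | ⟨hc1, hs1⟩
        · subst he1
          rcases hdisj' with ⟨he, hcx⟩ | ⟨hcx, hs⟩
          · exact Or.inl ⟨he, hcx.trans hc1⟩
          · exact Or.inr ⟨hcx, hs⟩
        · rcases hdisj' with ⟨he, hcx⟩ | ⟨hcx, hs⟩
          · exact Or.inr ⟨hcx.trans hc1, he ▸ hs1⟩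
          · exact Or.inr ⟨hcx, by omega⟩
      · intro hfalse
        obtain ⟨hch1, hde', hall'⟩ := hstab' hfalse
        obtain ⟨hch, hde1, hall1⟩ := hstab1 hch1
        subst hde1
        refine ⟨hch, hde', ?_⟩
        intro x hx hmapx n hadjn hninb
        rcases List.mem_cons.mp hx with h | h
        · subst h
          have hmemn : n ∈ pvNbrsB x.1 x.2 := by
            apply mem_pvNbrsB.mpr
            simpa using hadjn
          have := hall1 n hmemn
          obtain ⟨h1, h2, h3, h4⟩ := hninb
          omega
        · exact hall' x h hmapx n hadjn hninb
    · have hpull : pvPull maps W H (d, ch) cl = (d, ch) := by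
        simp only [pvPull]
        rw [if_pos hm]
      obtain ⟨d', ch', hfold', hInv', hdisj', hstab'⟩ :=
        ih (fun x hx => hin x (List.mem_cons_of_mem _ hx)) d ch hInv
      refine ⟨d', ch', ?_, hInv', hdisj', ?_⟩
      · rw [List.foldl_cons, hpull]
        exact hfold'
      · intro hfalse
        obtain ⟨hch, hde, hall⟩ := hstab' hfalse
        refine ⟨hch, hde, ?_⟩
        intro x hx hmapx
        rcases List.mem_cons.mp hx with h | h
        · exact absurd (h ▸ hmapx) hm
        · exact hall x h hmapx

-- the raster sweep is the fold of pvPull over the list of all cells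
def pvCells (W H : Int) : List (Int × Int) :=
  (PySem.List.pyRange 0 H 1).flatMap (fun y =>
    (PySem.List.pyRange 0 W 1).map (fun x => ((x, y) : Int × Int)))

lemma pvSweep_eq (maps : List (List Int)) (W H : Int) (d : List (List Int)) :
    pvSweep maps W H d = List.foldl (pvPull maps W H) (d, false) (pvCells W H) := by
  unfold pvSweep pvCells
  rw [List.foldl_flatMap]
  congr 1
  funext st y
  rw [List.foldl_map]

lemma mem_pvCells {W H : Int} {c : Int × Int} : c ∈ pvCells W H ↔ pvInb W H c := by
  unfold pvCells pvInb
  simp only [List.mem_flatMap, List.mem_map, PySem.List.mem_pyRange_one]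
  constructor
  · rintro ⟨y, ⟨hy0, hyH⟩, x, ⟨hx0, hxW⟩, he⟩
    rw [← he]
    exact ⟨by omega, by omega, by omega, by omega⟩
  · rintro ⟨h1, h2, h3, h4⟩
    exact ⟨c.2, ⟨h3, h4⟩, c.1, ⟨h1, h2⟩, rfl⟩

lemma pvRunSweeps_stable (maps : List (List Int)) (W H : Int) :
    ∀ (fuel : Nat) (d : List (List Int)), pvInv maps W H d →
    (pvSum d).toNat < fuel →
    pvInv maps W H (pvRunSweeps maps W H fuel d) ∧
      pvStable maps W H (pvRunSweeps maps W H fuel d) := by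
  intro fuel
  induction fuel with
  | zero => intro d _ hfuel; omega
  | succ fuel ih =>
    intro d hInv hfuel
    obtain ⟨d1, ch1, hfold, hInv1, hdisj, hstab⟩ :=
      pvSweepFold maps W H (pvCells W H) (fun cl hcl => mem_pvCells.mp hcl) d false hInv
    have hsw : pvSweep maps W H d = (d1, ch1) := by
      rw [pvSweep_eq]
      exact hfold
    have hrun : pvRunSweeps maps W H (fuel + 1) d
        = if ch1 then pvRunSweeps maps W H fuel d1 else d1 := by
      rw [pvRunSweeps, hsw]
    cases ch1 with
    | false =>
      obtain ⟨_, hde, hall⟩ := hstab rfl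
      subst hde
      rw [hrun]
      simp only [if_neg (Bool.false_ne_true)]
      refine ⟨hInv1, ?_⟩
      intro x n hx hn hadj hmap
      exact hall n (mem_pvCells.mpr hn) hmap x (pvAdj_symm hadj) hx
    | true =>
      rw [hrun]
      simp only [if_pos]
      rcases hdisj with ⟨_, hce⟩ | ⟨_, hs⟩
      · exact absurd hce.symm Bool.false_ne_true
      · apply ih d1 hInv1
        have h0 : 0 ≤ pvSum d1 := (pvSum_bounds W H hInv1.1
          (fun c hc => ⟨(hInv1.2.2 c hc).1, (hInv1.2.2 c hc).2.1⟩)).1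
        omega

-- ===== stability determines the grid =====

lemma pvPath_le (maps : List (List Int)) (W H : Int) (m : List (List Int))
    (hW : 0 < W) (hH : 0 < H) (hSt : pvStable maps W H m)
    (hstart : pvMemoAt m 0 0 = 1) :
    ∀ (c : Int × Int) (k : Int), PvPath maps W H c k →
      pvInb W H c ∧ pvMemoAt m c.1 c.2 ≤ k := by
  intro c k hp
  induction hp with
  | start => exact ⟨⟨le_rfl, hW, le_rfl, hH⟩, by simp only; omega⟩
  | step c n k hp hadj hn hmap ih =>
    refine ⟨hn, ?_⟩
    have := hSt c n ih.1 hn hadj hmap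
    omega

lemma pvUnique (maps : List (List Int)) (W H : Int) (hW : 0 < W) (hH : 0 < H)
    (m1 m2 : List (List Int)) (hI1 : pvInv maps W H m1) (hS1 : pvStable maps W H m1)
    (hI2 : pvInv maps W H m2) (hS2 : pvStable maps W H m2) :
    ∀ c : Int × Int, pvInb W H c → pvMemoAt m1 c.1 c.2 = pvMemoAt m2 c.1 c.2 := by
  have key : ∀ (a b : List (List Int)), pvInv maps W H a → pvInv maps W H b →
      pvStable maps W H b → ∀ c : Int × Int, pvInb W H c →
      pvMemoAt a c.1 c.2 ≠ 999 → pvMemoAt b c.1 c.2 ≤ pvMemoAt a c.1 c.2 := by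
    intro a b hIa hIb hSb c hc hne
    have hpath : PvPath maps W H c (pvMemoAt a c.1 c.2) := (hIa.2.2 c hc).2.2 hne
    exact (pvPath_le maps W H b hW hH hSb hIb.2.1 c _ hpath).2
  intro c hc
  have hb1 := hI1.2.2 c hc
  have hb2 := hI2.2.2 c hc
  by_cases h1 : pvMemoAt m1 c.1 c.2 = 999
  · by_cases h2 : pvMemoAt m2 c.1 c.2 = 999
    · rw [h1, h2]
    · have := key m2 m1 hI2 hI1 hS1 c hc h2
      omega
  · have hle : pvMemoAt m2 c.1 c.2 ≤ pvMemoAt m1 c.1 c.2 := key m1 m2 hI1 hI2 hS2 c hc h1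
    have h2 : pvMemoAt m2 c.1 c.2 ≠ 999 := by omega
    have := key m2 m1 hI2 hI1 hS1 c hc h2
    omega

-- ===== VERDICT (by name: the statement is the Claim_ definition above) =====
theorem solution_spec : Claim_equal_solution := by
  intro maps _hdom hpre
  unfold Spec_solution
  obtain ⟨hne, hrow0, -⟩ := hpre
  match maps, hne with
  | r :: rest, _ =>
  rw [PySem.List.pyGetD_zero_cons] at hrow0
  unfold solution solution_alt
  rw [PySem.List.pyGetD_zero_cons]
  set H : Int := ((r :: rest).length : Int) with hHdef
  set W : Int := (r.length : Int) with hWdef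
  have hW : 0 < W := by
    have : r.length ≠ 0 := fun h => hrow0 (List.eq_nil_of_length_eq_zero h)
    omega
  have hH : 0 < H := by
    have : (r :: rest).length = rest.length + 1 := rfl
    omega
  set m0 : List (List Int) := pvMemoSet ((PySem.List.pyRange 0 H 1).map
    (fun _ => (PySem.List.pyRange 0 W 1).map (fun _ => (999 : Int)))) 0 0 1 with hm0
  have hgrid : pvMemoSet ((PySem.List.pyRange 0 H 1).map
      (fun _ => List.replicate W.toNat (999 : Int))) 0 0 1 = m0 := by
    rw [hm0, pvGrid_eq]
  have hInv0 : pvInv (r :: rest) W H m0 := pvInit_inv (r :: rest) W H hW hH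
  have hQ0 : pvQInv (r :: rest) W H m0 [((0 : Int), (0 : Int))] := by
    constructor
    · intro c hc
      rw [List.mem_singleton.mp hc]
      exact ⟨le_rfl, hW, le_rfl, hH⟩
    · intro x n hx hn _ _ hlt
      have hax := pvInit_at W H x hx
      have han := pvInit_at W H n hn
      rw [← hm0] at hax han
      by_cases hx0 : x = (0, 0)
      · rw [hx0]; exact List.mem_singleton_self _
      · exfalso
        rw [if_neg hx0] at hax
        rw [hax] at hlt
        split_ifs at han <;> omega
  have hbnd := pvSum_bounds W H hInv0.1
    (fun c hc => ⟨(hInv0.2.2 c hc).1, (hInv0.2.2 c hc).2.1⟩)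
  have hA := pvRunA_stable (r :: rest) W H (999 * (H.toNat * W.toNat) + 2) m0
    [((0 : Int), (0 : Int))] hInv0 hQ0 (by simp only [List.length_singleton]; omega)
  have hB := pvRunSweeps_stable (r :: rest) W H (999 * (H.toNat * W.toNat) + 1) m0
    hInv0 (by omega)
  have htgt : pvInb W H ((W - 1 : Int), (H - 1 : Int)) := ⟨by omega, by omega, by omega, by omega⟩
  have heq := pvUnique (r :: rest) W H hW hH _ _ hA.1 hA.2 hB.1 hB.2
    ((W - 1 : Int), (H - 1 : Int)) htgt
  simp only at heq
  show (if pvMemoAt (pvRunA (r :: rest) W H (999 * (H.toNat * W.toNat) + 2) m0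
      [((0 : Int), (0 : Int))]) (W - 1) (H - 1) ≠ 999
    then pvMemoAt (pvRunA (r :: rest) W H (999 * (H.toNat * W.toNat) + 2) m0
      [((0 : Int), (0 : Int))]) (W - 1) (H - 1) else -1)
    = (if pvMemoAt (pvRunSweeps (r :: rest) W H (999 * (H.toNat * W.toNat) + 1)
        (pvMemoSet ((PySem.List.pyRange 0 H 1).map
          (fun _ => List.replicate W.toNat (999 : Int))) 0 0 1)) (W - 1) (H - 1) ≠ 999
      then pvMemoAt (pvRunSweeps (r :: rest) W H (999 * (H.toNat * W.toNat) + 1)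
        (pvMemoSet ((PySem.List.pyRange 0 H 1).map
          (fun _ => List.replicate W.toNat (999 : Int))) 0 0 1)) (W - 1) (H - 1) else -1)
  rw [hgrid, heq]
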